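-- pv_equiv track=rewrite | github.com/tomaszkapron/pedestrian-tracking-system | src/ROITracker.py | getListOfFreeIds
-- ===== SOURCE A (Python) =====
-- def getListOfFreeIds(numberOfIdsNeeded: int, takenIds: list[int]) -> list[int]:
--     freeIds = []
--     suspectId = 0
--     while len(freeIds) != numberOfIdsNeeded:
--         if suspectId in takenIds:
--             suspectId += 1
--             continue
--         freeIds.append(suspectId)
--         suspectId += 1
--
--     return freeIds
-- ===== SOURCE B (Python) =====
-- def getListOfFreeIds(numberOfIdsNeeded: int, takenIds: list[int]) -> list[int]:
--     upperBound = numberOfIdsNeeded + len(takenIds)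
--     free = set(range(upperBound)) - set(takenIds)
--     return sorted(free)[:numberOfIdsNeeded]
-- ===== Notes on version B (the rewrite author's own statement) =====
-- stated objective: faster
-- what changed: Replaces the upward-scanning membership-test loop (a linear scan of takenIds per candidate) with a bounded candidate range, one set difference and a sort-and-slice.
import Mathlib
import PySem

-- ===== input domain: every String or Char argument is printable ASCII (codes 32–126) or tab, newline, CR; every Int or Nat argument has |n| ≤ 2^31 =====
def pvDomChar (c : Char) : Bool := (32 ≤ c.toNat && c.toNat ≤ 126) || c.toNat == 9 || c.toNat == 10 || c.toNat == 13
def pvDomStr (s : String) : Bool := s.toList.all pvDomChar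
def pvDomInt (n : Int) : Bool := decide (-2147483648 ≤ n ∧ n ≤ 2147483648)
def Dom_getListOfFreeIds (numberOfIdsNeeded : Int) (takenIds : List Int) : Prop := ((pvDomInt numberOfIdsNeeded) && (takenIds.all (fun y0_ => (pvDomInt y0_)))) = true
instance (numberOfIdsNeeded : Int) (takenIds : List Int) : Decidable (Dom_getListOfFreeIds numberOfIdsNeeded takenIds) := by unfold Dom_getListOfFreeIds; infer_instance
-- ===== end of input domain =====

-- B replaces A's upward-scanning membership loop with a bounded candidate range,
-- a set difference and a sort-and-slice (objective: faster, O((n+m) log (n+m)) vs O(n*m)).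

-- ===== PORT A =====
-- A's while-loop, with a fuel argument that only makes it total: under
-- Pre_ (numberOfIdsNeeded ≥ 0) the fuel (n+1)*(len+1) is provably enough
-- iterations, so the recursion is exactly A's loop; for a negative
-- numberOfIdsNeeded the Python loop never terminates (excluded by Pre_).
def goA (numberOfIdsNeeded : Int) (takenIds : List Int) :
    Nat → Int → List Int → List Int
  | 0, _, freeIds => freeIds
  | fuel + 1, suspectId, freeIds =>
    if (freeIds.length : Int) = numberOfIdsNeeded then freeIds
    else if takenIds.contains suspectId then
      goA numberOfIdsNeeded takenIds fuel (suspectId + 1) freeIds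
    else
      goA numberOfIdsNeeded takenIds fuel (suspectId + 1) (freeIds ++ [suspectId])

def getListOfFreeIds (numberOfIdsNeeded : Int) (takenIds : List Int) : List Int :=
  goA numberOfIdsNeeded takenIds
    ((numberOfIdsNeeded.toNat + 1) * (takenIds.length + 1)) 0 []

-- ===== PORT B =====
def getListOfFreeIds_alt (numberOfIdsNeeded : Int) (takenIds : List Int) : List Int :=
  let upperBound : Int := numberOfIdsNeeded + takenIds.length
  let free : PySem.Set Int :=
    PySem.Set.diff (PySem.Set.ofList (PySem.List.pyRange 0 upperBound 1))
      (PySem.Set.ofList takenIds)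
  PySem.List.slice (PySem.List.sorted free (fun x => x)) none (some numberOfIdsNeeded)

-- ===== PRECONDITION & SPEC =====
-- Pre_ excludes only numberOfIdsNeeded < 0, on which A's while-loop never
-- terminates (A returns no value there).
def Pre_getListOfFreeIds (numberOfIdsNeeded : Int) (takenIds : List Int) : Prop :=
  0 ≤ numberOfIdsNeeded
instance (numberOfIdsNeeded : Int) (takenIds : List Int) : Decidable (Pre_getListOfFreeIds numberOfIdsNeeded takenIds) := by unfold Pre_getListOfFreeIds; infer_instance

def pvWitness_getListOfFreeIds : Int × List Int := (3, [0, 0, 2, -5])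

def Spec_getListOfFreeIds (numberOfIdsNeeded : Int) (takenIds : List Int) (out : List Int) : Prop := out = getListOfFreeIds_alt numberOfIdsNeeded takenIds
instance (numberOfIdsNeeded : Int) (takenIds : List Int) (out : List Int) : Decidable (Spec_getListOfFreeIds numberOfIdsNeeded takenIds out) := by unfold Spec_getListOfFreeIds; infer_instance

-- ===== CLAIM (what is proved, stated in full; the proofs are below) =====
def Claim_equal_getListOfFreeIds : Prop := ∀ (numberOfIdsNeeded : Int) (takenIds : List Int), Dom_getListOfFreeIds numberOfIdsNeeded takenIds → Pre_getListOfFreeIds numberOfIdsNeeded takenIds → Spec_getListOfFreeIds numberOfIdsNeeded takenIds (getListOfFreeIds numberOfIdsNeeded takenIds)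

-- ===== LEMMAS AND PROOFS =====

-- canonical form: the free ids below an upper bound, in increasing order
def freeBelow (takenIds : List Int) (m : Nat) : List Int :=
  (PySem.List.pyRange 0 (m : Int) 1).filter (fun x => !takenIds.contains x)

-- proof-side mirror of A's loop: the free ids ≥ s found in `fuel` steps, at most k of them
def takeFree (takenIds : List Int) : Nat → Int → Nat → List Int
  | 0, _, _ => []
  | _ + 1, _, 0 => []
  | fuel + 1, s, k + 1 =>
    if takenIds.contains s then takeFree takenIds fuel (s + 1) (k + 1)
    else s :: takeFree takenIds fuel (s + 1) k

theorem goA_eq_takeFree (n : Int) (taken : List Int) (hn : 0 ≤ n) :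
    ∀ (fuel : Nat) (s : Int) (acc : List Int), acc.length ≤ n.toNat →
      goA n taken fuel s acc = acc ++ takeFree taken fuel s (n.toNat - acc.length) := by
  intro fuel
  induction fuel with
  | zero => intro s acc _; simp [goA, takeFree]
  | succ f ih =>
    intro s acc hacc
    by_cases hlen : (acc.length : Int) = n
    · have hk : n.toNat - acc.length = 0 := by omega
      simp [goA, hlen, hk, takeFree]
    · have hk : ∃ k, n.toNat - acc.length = k + 1 := by
        refine ⟨n.toNat - acc.length - 1, ?_⟩; omega
      obtain ⟨k, hk⟩ := hk
      by_cases hc : taken.contains s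
      · rw [goA, if_neg hlen, if_pos hc, ih (s + 1) acc hacc, hk, takeFree, if_pos hc]
      · have hlt : acc.length < n.toNat := by omega
        rw [goA, if_neg hlen, if_neg hc, ih (s + 1) (acc ++ [s]) (by simp; omega), hk,
          takeFree, if_neg hc]
        simp only [List.length_append, List.length_cons, List.length_nil]
        have : n.toNat - (acc.length + 1) = k := by omega
        rw [this, List.append_assoc, List.singleton_append]

theorem takeFree_eq_filter_take (taken : List Int) :
    ∀ (fuel : Nat) (s : Int) (k : Nat),
      takeFree taken fuel s k =
        ((PySem.List.pyRange s (s + fuel) 1).filter (fun x => !taken.contains x)).take k := by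
  intro fuel
  induction fuel with
  | zero =>
    intro s k
    rw [PySem.List.pyRange_one_eq_nil (by simp)]
    simp [takeFree]
  | succ f ih =>
    intro s k
    have hcons : PySem.List.pyRange s (s + ((f : Int) + 1)) 1 =
        s :: PySem.List.pyRange (s + 1) (s + ((f : Int) + 1)) 1 :=
      PySem.List.pyRange_one_cons (by omega)
    have harg : s + ((f : Int) + 1) = (s + 1) + (f : Int) := by ring
    match k with
    | 0 => simp [takeFree]
    | k + 1 =>
      by_cases hc : taken.contains s
      · rw [takeFree, if_pos hc, ih (s + 1) (k + 1)]
        push_cast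
        rw [hcons, List.filter_cons_of_neg (by simpa using hc), harg]
      · rw [takeFree, if_neg hc, ih (s + 1) k]
        push_cast
        rw [hcons, List.filter_cons_of_pos (by simpa using hc), List.take_succ_cons, harg]

theorem freeBelow_prefix (taken : List Int) {m m' : Nat} (h : m ≤ m') (k : Nat)
    (hk : k ≤ (freeBelow taken m).length) :
    (freeBelow taken m').take k = (freeBelow taken m).take k := by
  have hsplit : PySem.List.pyRange 0 (m' : Int) 1 =
      PySem.List.pyRange 0 (m : Int) 1 ++ PySem.List.pyRange (m : Int) (m' : Int) 1 :=
    PySem.List.pyRange_one_append 0 m m' (by positivity) (by exact_mod_cast h)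
  unfold freeBelow
  rw [hsplit, List.filter_append]
  exact List.take_append_of_le_length hk

-- pigeonhole: among the m = n + len(taken) candidates at least n are free
theorem length_freeBelow_ge (taken : List Int) (n : Nat) :
    n ≤ (freeBelow taken (n + taken.length)).length := by
  set m : Nat := n + taken.length with hm
  have hlenr : (PySem.List.pyRange 0 (m : Int) 1).length = m := by
    rw [PySem.List.length_pyRange_one]; omega
  have hpart := (List.length_eq_length_filter_add
    (l := PySem.List.pyRange 0 (m : Int) 1) (fun x => taken.contains x)).symm
  have htk : ((PySem.List.pyRange 0 (m : Int) 1).filter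
      (fun x => taken.contains x)).length ≤ taken.length := by
    have hnd : ((PySem.List.pyRange 0 (m : Int) 1).filter
        (fun x => taken.contains x)).Nodup :=
      (PySem.List.nodup_pyRange_one 0 (m : Int)).filter _
    have hsub : ((PySem.List.pyRange 0 (m : Int) 1).filter
        (fun x => taken.contains x)) ⊆ taken.dedup := by
      intro x hx
      have := List.of_mem_filter hx
      simp only [List.contains_iff_mem] at this
      exact List.mem_dedup.mpr (by simpa using this)
    have h1 := (List.subperm_of_subset hnd hsub).length_le
    have h2 := (List.dedup_sublist taken).length_le
    omega
  have : (freeBelow taken m).length =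
      ((PySem.List.pyRange 0 (m : Int) 1).filter (fun x => !taken.contains x)).length := rfl
  omega

-- B computes take n of the canonical list
theorem alt_eq_take (n : Int) (taken : List Int) (hn : 0 ≤ n) :
    getListOfFreeIds_alt n taken = (freeBelow taken (n.toNat + taken.length)).take n.toNat := by
  unfold getListOfFreeIds_alt
  have hub : n + (taken.length : Int) = ((n.toNat + taken.length : Nat) : Int) := by
    push_cast; omega
  simp only [hub]
  have hof : PySem.Set.ofList (PySem.List.pyRange 0 ((n.toNat + taken.length : Nat) : Int) 1) =
      PySem.List.pyRange 0 ((n.toNat + taken.length : Nat) : Int) 1 :=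
    PySem.Set.ofList_eq_self_of_nodup _ (PySem.List.nodup_pyRange_one _ _)
  have hdiff : PySem.Set.diff
      (PySem.Set.ofList (PySem.List.pyRange 0 ((n.toNat + taken.length : Nat) : Int) 1))
      (PySem.Set.ofList taken) = freeBelow taken (n.toNat + taken.length) := by
    rw [hof]
    unfold PySem.Set.diff freeBelow
    refine List.filter_congr ?_
    intro x _
    simp [PySem.Set.contains, PySem.Set.mem_ofList]
  rw [hdiff]
  have hsorted : PySem.List.sorted (freeBelow taken (n.toNat + taken.length)) (fun x => x) =
      freeBelow taken (n.toNat + taken.length) := by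
    refine PySem.List.sorted_eq_self_of_pairwise _ _ ?_
    have : (freeBelow taken (n.toNat + taken.length)).Pairwise (· < ·) :=
      (PySem.List.pairwise_lt_pyRange_one _ _).filter _
    exact this.imp le_of_lt
  rw [hsorted, PySem.List.slice_to _ hn]

-- ===== VERDICT (by name: the statement is the Claim_ definition above) =====
theorem getListOfFreeIds_spec : Claim_equal_getListOfFreeIds := by
  intro n taken _ hn
  unfold Spec_getListOfFreeIds getListOfFreeIds
  rw [goA_eq_takeFree n taken hn _ 0 [] (by simp), takeFree_eq_filter_take]
  have hz : (0 : Int) + (((n.toNat + 1) * (taken.length + 1) : Nat) : Int) =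
      (((n.toNat + 1) * (taken.length + 1) : Nat) : Int) := by ring
  rw [hz]
  have hA : goA n taken ((n.toNat + 1) * (taken.length + 1)) 0 [] =
      (freeBelow taken ((n.toNat + 1) * (taken.length + 1))).take n.toNat := by
    rw [goA_eq_takeFree n taken hn _ 0 [] (by simp), takeFree_eq_filter_take]
    simp only [List.nil_append, List.length_nil, Nat.sub_zero]
    unfold freeBelow
    rw [hz]
  rw [show ([] : List Int) ++ _ = _ from List.nil_append _]
  have hfuel : n.toNat + taken.length ≤ (n.toNat + 1) * (taken.length + 1) := by
    nlinarith [Nat.zero_le (n.toNat * taken.length)]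
  have hpref := freeBelow_prefix taken hfuel n.toNat (length_freeBelow_ge taken n.toNat)
  simp only [List.length_nil, Nat.sub_zero]
  calc ((PySem.List.pyRange 0 (((n.toNat + 1) * (taken.length + 1) : Nat) : Int) 1).filter
          (fun x => !taken.contains x)).take n.toNat
      = (freeBelow taken ((n.toNat + 1) * (taken.length + 1))).take n.toNat := rfl
    _ = (freeBelow taken (n.toNat + taken.length)).take n.toNat := hpref
    _ = getListOfFreeIds_alt n taken := (alt_eq_take n taken hn).symm
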